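-- pv_equiv track=rewrite | github.com/HongyuCao3/VRAG-fundus | utils.py | find_longest_diagnosis_keys
-- ===== SOURCE A (Python) =====
-- def find_longest_diagnosis_keys(response, diagnosing_level):
--     # 将response转换为小写以确保匹配时不区分大小写
--     response_lower = response.lower()
--     # 按键的长度降序排序
--     sorted_keys = sorted(diagnosing_level.keys(), key=lambda x: len(x), reverse=True)
--     # 初始化结果列表
--     result = []
--     # 遍历排序后的键
--     for key in sorted_keys:
--         # 将键也转换为小写进行比较
--         key_lower = key.lower()
--         if key_lower in response_lower:
--             # 如果找到匹配，则添加到结果列表中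
--             result.append(key)
--             # 从response中移除已匹配的部分，避免后续误匹配
--             response_lower = response_lower.replace(key_lower, '')
--             # 由于只匹配一次，可以在这里跳出内层循环
--             break
--     return result
-- ===== SOURCE B (Python) =====
-- def find_longest_diagnosis_keys(response, diagnosing_level):
--     # Single pass over the dict keys, no sort: keep the longest matching key
--     # (strict '>' keeps the earliest key among equal-length matches, like the
--     # stable sort's first match).
--     response_lower = response.lower()
--     best = None
--     for key in diagnosing_level.keys():
--         if key.lower() in response_lower and (best is None or len(key) > len(best)):
--             best = key
--     return [best] if best is not None else []
-- ===== Notes on version B (the rewrite author's own statement) =====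
-- stated objective: simpler
-- what changed: Replaced sort-keys-by-length-then-take-first-match with a single pass over the dict keys that keeps the longest matching key (strict > preserves the stable sort's tie-breaking).
import Mathlib
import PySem

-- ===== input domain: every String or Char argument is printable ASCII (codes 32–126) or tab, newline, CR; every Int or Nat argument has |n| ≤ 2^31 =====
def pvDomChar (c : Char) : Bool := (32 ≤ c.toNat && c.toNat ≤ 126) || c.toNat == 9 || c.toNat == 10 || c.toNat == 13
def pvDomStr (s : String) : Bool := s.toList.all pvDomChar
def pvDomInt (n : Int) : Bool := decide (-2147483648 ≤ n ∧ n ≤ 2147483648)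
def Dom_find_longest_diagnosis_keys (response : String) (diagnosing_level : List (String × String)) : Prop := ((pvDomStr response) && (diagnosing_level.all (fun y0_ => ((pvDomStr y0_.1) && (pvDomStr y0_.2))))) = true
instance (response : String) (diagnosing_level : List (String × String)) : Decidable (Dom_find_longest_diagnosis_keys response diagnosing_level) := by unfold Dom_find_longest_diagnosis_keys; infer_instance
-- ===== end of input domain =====

-- B replaces A's sort-by-length-then-first-match with one pass keeping the longest
-- matching key (simpler; same return value).

-- ===== PORT A =====
-- loop body of A: scan sorted_keys; on the first match, result = [key] and break
-- (A's `response_lower.replace(key_lower, '')` is computed right before the break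
-- and never used, so it does not affect the returned value).
def pvALoop (response_lower : String) : List String → List String
  | [] => []
  | key :: rest =>
    let key_lower := PySem.Str.lower key
    if PySem.Str.isIn key_lower response_lower then [key]
    else pvALoop response_lower rest

def find_longest_diagnosis_keys (response : String) (diagnosing_level : List (String × String)) : List String :=
  let response_lower := PySem.Str.lower response
  let sorted_keys := PySem.List.sorted (PySem.List.dedup (diagnosing_level.map Prod.fst)) (fun x => PySem.Str.len x) true
  pvALoop response_lower sorted_keys

-- ===== PORT B =====
-- loop body of B: best = key if key.lower() in response_lower and (best is None or len(key) > len(best))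
def pvBStep (response_lower : String) (best : Option String) (key : String) : Option String :=
  if PySem.Str.isIn (PySem.Str.lower key) response_lower &&
      (match best with
       | none => true
       | some b => decide (PySem.Str.len b < PySem.Str.len key)) then some key
  else best

def find_longest_diagnosis_keys_alt (response : String) (diagnosing_level : List (String × String)) : List String :=
  let response_lower := PySem.Str.lower response
  match (PySem.List.dedup (diagnosing_level.map Prod.fst)).foldl (pvBStep response_lower) none with
  | some b => [b]
  | none => []

-- ===== PRECONDITION & SPEC =====
def Spec_find_longest_diagnosis_keys (response : String) (diagnosing_level : List (String × String)) (out : List String) : Prop := out = find_longest_diagnosis_keys_alt response diagnosing_level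
instance (response : String) (diagnosing_level : List (String × String)) (out : List String) : Decidable (Spec_find_longest_diagnosis_keys response diagnosing_level out) := by unfold Spec_find_longest_diagnosis_keys; infer_instance

-- ===== CLAIM (what is proved, stated in full; the proofs are below) =====
def Claim_equal_find_longest_diagnosis_keys : Prop := ∀ (response : String) (diagnosing_level : List (String × String)), Dom_find_longest_diagnosis_keys response diagnosing_level → Spec_find_longest_diagnosis_keys response diagnosing_level (find_longest_diagnosis_keys response diagnosing_level)

-- ===== LEMMAS AND PROOFS =====

-- A's loop returns the first matching key (as a singleton) of the scanned list.
theorem pvALoop_eq_find? (rl : String) (l : List String) :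
    pvALoop rl l = match l.find? (fun k => PySem.Str.isIn (PySem.Str.lower k) rl) with
      | some k => [k]
      | none => [] := by
  induction l with
  | nil => rfl
  | cons k rest ih =>
    simp only [pvALoop]
    cases h : PySem.Str.isIn (PySem.Str.lower k) rl with
    | true => rw [if_pos rfl, List.find?_cons_of_pos (p := fun k => PySem.Str.isIn (PySem.Str.lower k) rl) h]
    | false =>
      have h' : ¬ ((fun k => PySem.Str.isIn (PySem.Str.lower k) rl) k = true) := by
        simp only [h]; exact Bool.false_ne_true
      rw [if_neg Bool.false_ne_true, List.find?_cons_of_neg (p := fun k => PySem.Str.isIn (PySem.Str.lower k) rl) h', ih]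

-- Inserting x into a list sorted descending by key commutes with find?:
-- it behaves exactly like B's accumulator step.
theorem find?_insertBy (p : String → Bool) (key : String → Int) (x : String) (s : List String)
    (hs : s.Pairwise (fun a b => key b ≤ key a)) :
    (PySem.List.insertBy (fun a b => decide (key b < key a)) x s).find? p =
      (if p x && (match s.find? p with
                  | none => true
                  | some m => decide (key m < key x)) then some x else s.find? p) := by
  induction s with
  | nil =>
    simp only [PySem.List.insertBy, List.find?]
    by_cases hx : p x = true
    · simp [hx]
    · simp only [Bool.not_eq_true] at hx; simp [hx]
  | cons y ys ih =>
    have hy : ∀ b ∈ ys, key b ≤ key y := (List.pairwise_cons.mp hs).1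
    have hys : ys.Pairwise (fun a b => key b ≤ key a) := (List.pairwise_cons.mp hs).2
    simp only [PySem.List.insertBy]
    by_cases hlt : key y < key x
    · -- x is inserted in front of y
      simp only [hlt, decide_true, if_true, List.find?]
      by_cases hx : p x = true
      · -- x matches: every possible earlier match m in y::ys has key m ≤ key y < key x
        have hcond : (match (y :: ys).find? p with
            | none => true
            | some m => decide (key m < key x)) = true := by
          cases hm : (y :: ys).find? p with
          | none => rfl
          | some m =>
            have hmem : m ∈ y :: ys := List.mem_of_find?_eq_some hm
            have : key m ≤ key y := by
              rcases List.mem_cons.mp hmem with h | h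
              · exact le_of_eq (by rw [h])
              · exact hy m h
            simp only [decide_eq_true_iff]
            exact lt_of_le_of_lt this hlt
        simp only [List.find?] at hcond ⊢
        simp [hx, hcond]
      · simp only [Bool.not_eq_true] at hx
        simp [hx]
    · -- x goes somewhere after y
      rw [if_neg (by simp [hlt])]
      by_cases hpy : p y = true
      · -- y is the first match of y::ys and decide (key y < key x) = false: keep y
        rw [List.find?_cons_of_pos hpy, List.find?_cons_of_pos hpy]
        simp [hlt]
      · rw [List.find?_cons_of_neg hpy, List.find?_cons_of_neg hpy, ih hys]

-- First match of the length-descending stable sort = B's left fold.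
theorem find?_sorted_eq_foldl (rl : String) (l : List String) :
    (PySem.List.sorted l (fun x => PySem.Str.len x) true).find?
        (fun k => PySem.Str.isIn (PySem.Str.lower k) rl) =
      l.foldl (pvBStep rl) none := by
  induction l using List.reverseRecOn with
  | nil => rfl
  | append_singleton l x ih =>
    have hsplit : PySem.List.sorted (l ++ [x]) (fun x => PySem.Str.len x) true =
        PySem.List.insertBy (fun a b => decide (PySem.Str.len b < PySem.Str.len a)) x
          (PySem.List.sorted l (fun x => PySem.Str.len x) true) := by
      rw [PySem.List.sorted_rev_eq_foldl_insertBy, PySem.List.sorted_rev_eq_foldl_insertBy,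
        List.foldl_append]
      rfl
    rw [hsplit, List.foldl_append,
      find?_insertBy _ (fun x => PySem.Str.len x) x _
        (PySem.List.sorted_pairwise_rev l (fun x => PySem.Str.len x)), ih]
    simp only [List.foldl, pvBStep]

-- ===== VERDICT (by name: the statement is the Claim_ definition above) =====
theorem find_longest_diagnosis_keys_spec : Claim_equal_find_longest_diagnosis_keys := by
  intro response diagnosing_level _
  unfold Spec_find_longest_diagnosis_keys find_longest_diagnosis_keys find_longest_diagnosis_keys_alt
  rw [pvALoop_eq_find?, find?_sorted_eq_foldl]
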